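-- pv_equiv track=rewrite | github.com/grapheneaffiliate/h4-polytopic-attention | solve_arc2_train_af.py | solve_e48_e048c9ed
-- ===== SOURCE A (Python) =====
-- def solve_e48_e048c9ed(grid):
--     """Bars of varying lengths with sentinel value. Output value = (length-1)^2 % 10."""
--     rows, cols = len(grid), len(grid[0])
--
--     # Find the sentinel (isolated non-zero value not part of any bar)
--     # Find bars (horizontal sequences of same non-zero value)
--     bars = []
--     sentinel = None
--     sentinel_pos = None
--
--     for r in range(rows):
--         c = 0
--         while c < cols:
--             if grid[r][c] != 0:
--                 # Find extent of this bar
--                 color = grid[r][c]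
--                 start_c = c
--                 while c < cols and grid[r][c] == color:
--                     c += 1
--                 length = c - start_c
--                 if length == 1:
--                     # Check if isolated (no same-color neighbors)
--                     isolated = True
--                     for dr, dc in [(-1,0),(1,0),(0,-1),(0,1)]:
--                         nr, nc = r+dr, start_c+dc
--                         if 0 <= nr < rows and 0 <= nc < cols and grid[nr][nc] == color:
--                             isolated = False
--                     if isolated:
--                         sentinel = color
--                         sentinel_pos = (r, start_c)
--                         continue
--                 bars.append((r, start_c, length, color))
--             else:
--                 c += 1
--
--     if sentinel_pos is None or not bars:
--         return grid
--
--     out = [row[:] for row in grid]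
--     sent_r, sent_c = sentinel_pos
--
--     for bar_r, bar_start, bar_len, bar_color in bars:
--         val = ((bar_len - 1) ** 2) % 10
--         out[bar_r][sent_c] = val
--
--     return out
-- ===== SOURCE B (Python) =====
-- def solve_e48_e048c9ed(grid):
--     """Bars of varying lengths with sentinel value. Output value = (length-1)^2 % 10."""
--     rows, cols = len(grid), len(grid[0])
--
--     def color(r, c):
--         return grid[r][c] if 0 <= r < rows and 0 <= c < cols else 0
--
--     # A sentinel candidate is a nonzero cell with no same-color orthogonal neighbor.
--     def is_candidate(r, c):
--         v = grid[r][c]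
--         return v != 0 and all(color(r + dr, c + dc) != v
--                               for dr, dc in ((1, 0), (-1, 0), (0, 1), (0, -1)))
--
--     # Rightmost candidate cell of a row, if any.
--     def last_candidate(r):
--         return next((c for c in range(cols - 1, -1, -1) if is_candidate(r, c)), None)
--
--     # Value for a row: find the rightmost cell belonging to a bar (nonzero and not a
--     # candidate), then measure the bar's extent leftwards from it.
--     def row_value(r):
--         c = next((c for c in range(cols - 1, -1, -1)
--                   if grid[r][c] != 0 and not is_candidate(r, c)), None)
--         if c is None:
--             return None
--         ln = 1
--         while ln <= c and grid[r][c - ln] == grid[r][c]: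
--             ln += 1
--         return ((ln - 1) ** 2) % 10
--
--     cands = [last_candidate(r) for r in range(rows)]
--     vals = [row_value(r) for r in range(rows)]
--     if all(c is None for c in cands) or all(v is None for v in vals):
--         return grid
--     sent_col = next(cands[r] for r in range(rows - 1, -1, -1) if cands[r] is not None)
--     return [[vals[r] if j == sent_col and vals[r] is not None else x
--              for j, x in enumerate(row)] for r, row in enumerate(grid)]
-- ===== Notes on version B (the rewrite author's own statement) =====
-- stated objective: alternative
-- what changed: A walks each row left-to-right enumerating maximal runs and classifying them into a bars list plus sentinel while mutating a copied grid; B never builds a run list: it uses a cell-level candidate predicate (nonzero with no same-color orthogonal neighbor), scans each row right-to-left for its last candidate and its rightmost bar cell, measures that bar leftwards from its end, and rebuilds the grid from the per-row summaries.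
import Mathlib
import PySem

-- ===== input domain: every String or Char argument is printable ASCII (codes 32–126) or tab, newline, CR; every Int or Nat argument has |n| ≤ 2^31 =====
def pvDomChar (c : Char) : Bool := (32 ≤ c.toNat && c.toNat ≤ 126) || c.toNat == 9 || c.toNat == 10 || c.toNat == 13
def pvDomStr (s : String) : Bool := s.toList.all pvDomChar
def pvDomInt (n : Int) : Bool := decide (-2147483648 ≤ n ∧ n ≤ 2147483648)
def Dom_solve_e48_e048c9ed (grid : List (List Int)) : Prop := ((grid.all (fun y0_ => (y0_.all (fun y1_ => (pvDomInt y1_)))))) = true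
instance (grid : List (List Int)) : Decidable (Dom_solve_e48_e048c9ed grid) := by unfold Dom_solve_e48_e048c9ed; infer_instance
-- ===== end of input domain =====

-- B drops A's run-enumeration-and-classification scan: it uses a cell-level candidate
-- predicate and per-row right-to-left searches (last candidate cell, rightmost bar cell
-- measured leftwards), then rebuilds the grid from per-row summaries; objective: alternative.

-- ===== PORT A =====
-- inner `while c < cols and grid[r][c] == color: c += 1` (indices stay in range under Pre_, so getD is exact)
def runEndA (row : List Int) (cols : Nat) (color : Int) (c : Nat) : Nat :=
  if c < cols then
    if row.getD c 0 = color then runEndA row cols color (c + 1) else c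
  else c
termination_by cols - c

theorem runEndA_ge (row : List Int) (cols : Nat) (color : Int) (c : Nat) :
    c ≤ runEndA row cols color c := by
  unfold runEndA
  split_ifs with h1 h2
  · exact Nat.le_trans (Nat.le_succ c) (runEndA_ge row cols color (c + 1))
  · exact Nat.le_refl c
  · exact Nat.le_refl c
termination_by cols - c

theorem runEndA_gt (row : List Int) (cols : Nat) (color : Int) (c : Nat)
    (h : c < cols) (hv : row.getD c 0 = color) : c < runEndA row cols color c := by
  unfold runEndA
  rw [if_pos h, if_pos hv]
  exact Nat.lt_of_lt_of_le (Nat.lt_succ_self c) (runEndA_ge row cols color (c + 1))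

-- the four-neighbour isolation check of A (flag-style loop = all neighbours fail the test)
def isoA (grid : List (List Int)) (rows cols r s : Nat) (color : Int) : Bool :=
  ([(-1, 0), (1, 0), (0, -1), (0, 1)] : List (Int × Int)).all fun p =>
    let nr : Int := (r : Int) + p.1
    let nc : Int := (s : Int) + p.2
    !(decide (0 ≤ nr) && decide (nr < (rows : Int)) && decide (0 ≤ nc) && decide (nc < (cols : Int)) &&
      ((grid.getD nr.toNat []).getD nc.toNat 0 == color))

-- A's `while c < cols` body: bars/sentinel state threaded through the row scan
def loopA (grid : List (List Int)) (rows cols r c : Nat)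
    (bars : List (Nat × Nat × Nat × Int)) (sent : Option (Nat × Nat)) :
    List (Nat × Nat × Nat × Int) × Option (Nat × Nat) :=
  if h : c < cols then
    if (grid.getD r []).getD c 0 ≠ 0 then
      if runEndA (grid.getD r []) cols ((grid.getD r []).getD c 0) c - c == 1 &&
          isoA grid rows cols r c ((grid.getD r []).getD c 0) then
        loopA grid rows cols r (runEndA (grid.getD r []) cols ((grid.getD r []).getD c 0) c)
          bars (some (r, c))
      else
        loopA grid rows cols r (runEndA (grid.getD r []) cols ((grid.getD r []).getD c 0) c)
          (bars ++ [(r, c, runEndA (grid.getD r []) cols ((grid.getD r []).getD c 0) c - c,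
            (grid.getD r []).getD c 0)]) sent
    else
      loopA grid rows cols r (c + 1) bars sent
  else (bars, sent)
termination_by cols - c
decreasing_by
  · have := runEndA_gt (grid.getD r []) cols (( grid.getD r []).getD c 0) c h rfl
    omega
  · have := runEndA_gt (grid.getD r []) cols (( grid.getD r []).getD c 0) c h rfl
    omega
  · omega

def solve_e48_e048c9ed (grid : List (List Int)) : List (List Int) :=
  let rows := grid.length
  let cols := (grid.headD []).length
  let res := (List.range rows).foldl (fun st r => loopA grid rows cols r 0 st.1 st.2) ([], none)
  match res.2 with
  | none => grid
  | some (_, sc) =>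
    if res.1.isEmpty then grid
    else
      res.1.foldl (fun out b =>
        let val : Int := PySem.Int.mod (((b.2.2.1 : Int) - 1) ^ 2) 10
        out.set b.1 ((out.getD b.1 []).set sc val)) grid

-- ===== PORT B =====
-- `color(r, c)`: bounds-checked lookup defaulting to 0
def colorB (grid : List (List Int)) (rows cols : Nat) (nr nc : Int) : Int :=
  if 0 ≤ nr ∧ nr < (rows : Int) ∧ 0 ≤ nc ∧ nc < (cols : Int) then
    (grid.getD nr.toNat []).getD nc.toNat 0
  else 0

-- `is_candidate(r, c)`: nonzero cell, no same-color orthogonal neighbour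
def isCandB (grid : List (List Int)) (rows cols r c : Nat) : Bool :=
  (grid.getD r []).getD c 0 != 0 &&
  (([(1, 0), (-1, 0), (0, 1), (0, -1)] : List (Int × Int)).all fun p =>
    colorB grid rows cols ((r : Int) + p.1) ((c : Int) + p.2) != (grid.getD r []).getD c 0)

-- `range(cols-1, -1, -1)` = the indices below cols in descending order (exact)
def descB (cols : Nat) : List Nat := (List.range cols).reverse

-- `last_candidate(r)`: right-to-left search for a candidate cell
def lastCandB (grid : List (List Int)) (rows cols r : Nat) : Option Nat :=
  (descB cols).find? (isCandB grid rows cols r)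

-- the rightmost bar cell of `row_value`: nonzero and not a candidate, right-to-left
def lastBarCellB (grid : List (List Int)) (rows cols r : Nat) : Option Nat :=
  (descB cols).find? (fun c => (grid.getD r []).getD c 0 != 0 && !(isCandB grid rows cols r c))

-- `while ln <= c and grid[r][c-ln] == grid[r][c]: ln += 1` (c-ln >= 0 on Nat indices is ln ≤ c)
def extLenB (row : List Int) (c ln : Nat) : Nat :=
  if ln ≤ c ∧ row.getD (c - ln) 0 = row.getD c 0 then extLenB row c (ln + 1) else ln
termination_by c + 1 - ln

-- `row_value(r)` after its `next(...)` found cell c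
def rowValB (grid : List (List Int)) (rows cols r : Nat) : Option Int :=
  (lastBarCellB grid rows cols r).map fun c =>
    PySem.Int.mod (((extLenB (grid.getD r []) c 1 : Int) - 1) ^ 2) 10

def solve_e48_e048c9ed_alt (grid : List (List Int)) : List (List Int) :=
  let rows := grid.length
  let cols := (grid.headD []).length
  let cands := (List.range rows).map (lastCandB grid rows cols)
  let vals := (List.range rows).map (rowValB grid rows cols)
  if cands.all (·.isNone) || vals.all (·.isNone) then grid
  else
    let sentCol := (cands.reverse.findSome? id).getD 0
    (PySem.List.enumerate grid).map fun q =>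
      (PySem.List.enumerate q.2).map fun p =>
        if p.1 == (sentCol : Int) && (vals.getD q.1.toNat none).isSome then
          (vals.getD q.1.toNat none).getD 0
        else p.2

-- ===== PRECONDITION & SPEC =====
-- Pre_ excludes exactly the inputs on which Python A raises IndexError: the empty grid
-- (grid[0]) and grids with a row shorter than row 0 (grid[r][c] while scanning that row).
def Pre_solve_e48_e048c9ed (grid : List (List Int)) : Prop :=
  grid ≠ [] ∧ ∀ row ∈ grid, (grid.headD []).length ≤ row.length
instance (grid : List (List Int)) : Decidable (Pre_solve_e48_e048c9ed grid) := by
  unfold Pre_solve_e48_e048c9ed; infer_instance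

def pvWitness_solve_e48_e048c9ed : List (List Int) :=
  [[2, 2, 2, 0], [0, 0, 0, 5], [3, 3, 0, 0]]

def Spec_solve_e48_e048c9ed (grid : List (List Int)) (out : List (List Int)) : Prop := out = solve_e48_e048c9ed_alt grid
instance (grid : List (List Int)) (out : List (List Int)) : Decidable (Spec_solve_e48_e048c9ed grid out) := by unfold Spec_solve_e48_e048c9ed; infer_instance

-- ===== CLAIM (what is proved, stated in full; the proofs are below) =====
def Claim_equal_solve_e48_e048c9ed : Prop := ∀ (grid : List (List Int)), Dom_solve_e48_e048c9ed grid → Pre_solve_e48_e048c9ed grid → Spec_solve_e48_e048c9ed grid (solve_e48_e048c9ed grid)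

-- ===== LEMMAS AND PROOFS =====

-- proof-side view of A: run classification predicate and step
def candP (grid : List (List Int)) (rows cols : Nat) (b : Nat × Nat × Nat × Int) : Bool :=
  b.2.2.1 == 1 && isoA grid rows cols b.1 b.2.1 b.2.2.2

def classify (grid : List (List Int)) (rows cols : Nat)
    (st : List (Nat × Nat × Nat × Int) × Option (Nat × Nat)) (b : Nat × Nat × Nat × Int) :
    List (Nat × Nat × Nat × Int) × Option (Nat × Nat) :=
  if candP grid rows cols b then (st.1, some (b.1, b.2.1)) else (st.1 ++ [b], st.2)

-- the (start, end) pairs of the maximal nonzero runs of a row, from index c on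
def runsFrom (row : List Int) (cols c : Nat) : List (Nat × Nat) :=
  if h : c < cols then
    if row.getD c 0 ≠ 0 then
      (c, runEndA row cols (row.getD c 0) c) :: runsFrom row cols (runEndA row cols (row.getD c 0) c)
    else runsFrom row cols (c + 1)
  else []
termination_by cols - c
decreasing_by
  · have := runEndA_gt row cols (row.getD c 0) c h rfl
    omega
  · omega

def toRun (r : Nat) (row : List Int) (p : Nat × Nat) : Nat × Nat × Nat × Int :=
  (r, p.1, p.2 - p.1, row.getD p.1 0)

def Rrow (grid : List (List Int)) (rows cols r : Nat) : List (Nat × Nat × Nat × Int) :=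
  (runsFrom (grid.getD r []) cols 0).map (toRun r (grid.getD r []))

-- ---- generic list lemmas ----

theorem pv_findSome?_if (T U : Type) (l : List T) (q : T → Bool) (f : T → U) :
    l.findSome? (fun b => if q b then some (f b) else none) = (l.find? q).map f := by
  induction l with
  | nil => rfl
  | cons b l ih =>
    rw [List.findSome?_cons, List.find?_cons]
    by_cases h : q b <;> simp [h, ih]

theorem pv_findSome?_congr (T U : Type) (l : List T) (f g : T → Option U)
    (h : ∀ b ∈ l, f b = g b) : l.findSome? f = l.findSome? g := by
  induction l with
  | nil => rfl
  | cons b l ih =>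
    rw [List.findSome?_cons, List.findSome?_cons, h b (List.mem_cons_self ..)]
    cases g b with
    | some v => rfl
    | none => exact ih (fun x hx => h x (List.mem_cons_of_mem _ hx))

theorem pv_findSome?_snd (T : Type) (l : List T) (g : T → Option Nat) (key : T → Nat) :
    (l.findSome? (fun x => (g x).map (fun c => (key x, c)))).map Prod.snd = l.findSome? g := by
  induction l with
  | nil => rfl
  | cons x l ih =>
    rw [List.findSome?_cons, List.findSome?_cons]
    cases g x with
    | some v => rfl
    | none => exact ih

theorem pv_getLast?_filter (T : Type) (l : List T) (q : T → Bool) :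
    (l.filter q).getLast? = l.reverse.find? q := by
  induction l with
  | nil => rfl
  | cons x l ih =>
    rw [List.filter_cons, List.reverse_cons, List.find?_append, ← ih]
    by_cases h : q x
    · cases hl : (l.filter q).getLast? with
      | some v => simp [h, List.getLast?_cons, hl, List.getLastD_eq_getLast?]
      | none => simp [h, List.getLast?_cons, hl, List.getLastD_eq_getLast?, List.find?]
    · cases hl : (l.filter q).getLast? <;> simp [h, hl, List.find?]

theorem pv_foldl_split (S1 S2 T : Type) (f : S1 × S2 → T → S1 × S2)
    (f1 : S1 → T → S1) (f2 : S2 → T → S2) (hf : ∀ st b, f st b = (f1 st.1 b, f2 st.2 b))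
    (l : List T) (s1 : S1) (s2 : S2) :
    l.foldl f (s1, s2) = (l.foldl f1 s1, l.foldl f2 s2) := by
  induction l generalizing s1 s2 with
  | nil => rfl
  | cons b l ih => simp [List.foldl_cons, hf, ih]

-- ---- A: loopA processes exactly the run list ----

theorem loopA_runs (grid : List (List Int)) (rows cols r c : Nat)
    (bars : List (Nat × Nat × Nat × Int)) (sent : Option (Nat × Nat)) :
    loopA grid rows cols r c bars sent
      = ((runsFrom (grid.getD r []) cols c).map (toRun r (grid.getD r []))).foldl
          (classify grid rows cols) (bars, sent) := by
  rw [loopA, runsFrom]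
  by_cases h : c < cols
  · rw [dif_pos h, dif_pos h]
    by_cases hv : (grid.getD r []).getD c 0 ≠ 0
    · rw [if_pos hv, if_pos hv, List.map_cons, List.foldl_cons]
      simp only [classify, candP, toRun]
      by_cases hcand : (runEndA (grid.getD r []) cols ((grid.getD r []).getD c 0) c - c == 1 &&
          isoA grid rows cols r c ((grid.getD r []).getD c 0)) = true
      · rw [if_pos hcand, if_pos hcand]
        exact loopA_runs grid rows cols r _ bars (some (r, c))
      · rw [if_neg hcand, if_neg hcand]
        exact loopA_runs grid rows cols r _ _ sent
    · rw [if_neg hv, if_neg hv]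
      exact loopA_runs grid rows cols r (c + 1) bars sent
  · rw [dif_neg h, dif_neg h]
    simp
termination_by cols - c
decreasing_by
  · have := runEndA_gt (grid.getD r []) cols ((grid.getD r []).getD c 0) c h rfl
    omega
  · have := runEndA_gt (grid.getD r []) cols ((grid.getD r []).getD c 0) c h rfl
    omega
  · omega

theorem runEndA_le (row : List Int) (cols : Nat) (color : Int) (c : Nat) (h : c ≤ cols) :
    runEndA row cols color c ≤ cols := by
  unfold runEndA
  split_ifs with h1 h2
  · exact runEndA_le row cols color (c + 1) h1
  · omega
  · omega
termination_by cols - c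

theorem runEndA_mem (row : List Int) (cols : Nat) (color : Int) (c k : Nat)
    (h1 : c ≤ k) (h2 : k < runEndA row cols color c) : row.getD k 0 = color := by
  rw [runEndA] at h2
  split_ifs at h2 with ha hb
  · rcases Nat.eq_or_lt_of_le h1 with rfl | h
    · exact hb
    · exact runEndA_mem row cols color (c + 1) k h h2
  · omega
  · omega
termination_by cols - c

theorem runEndA_stop (row : List Int) (cols : Nat) (color : Int) (c : Nat)
    (h : runEndA row cols color c < cols) :
    row.getD (runEndA row cols color c) 0 ≠ color := by
  rw [runEndA] at h ⊢
  split_ifs at h ⊢ with ha hb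
  · exact runEndA_stop row cols color (c + 1) h
  · exact hb
  · exact absurd h ha
termination_by cols - c

theorem fold_split (grid : List (List Int)) (rows cols : Nat)
    (l : List (Nat × Nat × Nat × Int)) (bars : List (Nat × Nat × Nat × Int))
    (sent : Option (Nat × Nat)) :
    l.foldl (classify grid rows cols) (bars, sent)
      = (bars ++ l.filter (fun b => !(candP grid rows cols b)),
         l.foldl (fun s b => if candP grid rows cols b then some (b.1, b.2.1) else s) sent) := by
  induction l generalizing bars sent with
  | nil => simp
  | cons b l ih =>
    rw [List.foldl_cons, List.foldl_cons, List.filter_cons, classify]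
    by_cases h : candP grid rows cols b <;> simp [h, ih]

-- ---- per-run facts ----

theorem runsFrom_mem (row : List Int) (cols c : Nat) (hc : c ≤ cols)
    (H : c < cols → row.getD c 0 ≠ 0 → (c = 0 ∨ row.getD (c - 1) 0 ≠ row.getD c 0)) :
    ∀ p ∈ runsFrom row cols c,
      c ≤ p.1 ∧ p.1 < p.2 ∧ p.2 ≤ cols ∧ row.getD p.1 0 ≠ 0 ∧
      (∀ k, p.1 ≤ k → k < p.2 → row.getD k 0 = row.getD p.1 0) ∧
      (p.1 = 0 ∨ row.getD (p.1 - 1) 0 ≠ row.getD p.1 0) ∧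
      (p.2 < cols → row.getD p.2 0 ≠ row.getD p.1 0) := by
  intro p hp
  rw [runsFrom] at hp
  by_cases h : c < cols
  · rw [dif_pos h] at hp
    by_cases hv : row.getD c 0 ≠ 0
    · rw [if_pos hv] at hp
      have he1 : c < runEndA row cols (row.getD c 0) c := runEndA_gt row cols _ c h rfl
      have he2 : runEndA row cols (row.getD c 0) c ≤ cols := runEndA_le row cols _ c hc
      have Hnext : runEndA row cols (row.getD c 0) c < cols →
          row.getD (runEndA row cols (row.getD c 0) c) 0 ≠ 0 →
          (runEndA row cols (row.getD c 0) c = 0 ∨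
            row.getD (runEndA row cols (row.getD c 0) c - 1) 0 ≠
              row.getD (runEndA row cols (row.getD c 0) c) 0) := by
        intro hlt _
        right
        rw [runEndA_mem row cols (row.getD c 0) c _ (by omega) (by omega)]
        exact fun hEq => runEndA_stop row cols (row.getD c 0) c hlt hEq.symm
      rcases List.mem_cons.mp hp with rfl | hp'
      · refine ⟨Nat.le_refl c, he1, he2, hv, ?_, H h hv, ?_⟩
        · exact fun k hk1 hk2 => runEndA_mem row cols (row.getD c 0) c k hk1 hk2
        · exact fun hlt => runEndA_stop row cols (row.getD c 0) c hlt
      · have := runsFrom_mem row cols _ he2 Hnext p hp'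
        exact ⟨by omega, this.2⟩
    · rw [if_neg hv] at hp
      rw [Decidable.not_not] at hv
      have H' : c + 1 < cols → row.getD (c + 1) 0 ≠ 0 →
          (c + 1 = 0 ∨ row.getD (c + 1 - 1) 0 ≠ row.getD (c + 1) 0) := by
        intro _ hnz
        right
        simp only [Nat.add_sub_cancel]
        rw [hv]
        exact fun hEq => hnz hEq.symm
      have := runsFrom_mem row cols (c + 1) h H' p hp
      exact ⟨by omega, this.2⟩
  · rw [dif_neg h] at hp
    cases hp
termination_by cols - c
decreasing_by
  · have := runEndA_gt row cols (row.getD c 0) c h rfl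
    omega
  · omega

theorem extLen_go (row : List Int) (s e ln : Nat) (hse : s < e) (hle : 1 ≤ ln ∧ ln ≤ e - s)
    (hsame : ∀ k, s ≤ k → k < e → row.getD k 0 = row.getD s 0)
    (hleft : s = 0 ∨ row.getD (s - 1) 0 ≠ row.getD s 0) :
    extLenB row (e - 1) ln = e - s := by
  rw [extLenB]
  by_cases hlt : ln < e - s
  · rw [if_pos ?_]
    · exact extLen_go row s e (ln + 1) hse (by omega) hsame hleft
    · constructor
      · omega
      · rw [hsame (e - 1 - ln) (by omega) (by omega), hsame (e - 1) (by omega) (by omega)]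
  · have hln' : ln = e - s := by omega
    rw [if_neg ?_]
    · omega
    · rcases hleft with h0 | hne
      · subst h0
        intro hcond
        omega
      · intro hcond
        apply hne
        have h1 : e - 1 - ln = s - 1 := by omega
        have h2 : row.getD (e - 1) 0 = row.getD s 0 := hsame (e - 1) (by omega) (by omega)
        rw [← h1, hcond.2, h2]
termination_by e - s - ln

-- the leftward measuring loop of B returns the length of the run ending at e-1
theorem extLen_run (row : List Int) (s e : Nat) (hse : s < e)
    (hsame : ∀ k, s ≤ k → k < e → row.getD k 0 = row.getD s 0)
    (hleft : s = 0 ∨ row.getD (s - 1) 0 ≠ row.getD s 0) :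
    extLenB row (e - 1) 1 = e - s :=
  extLen_go row s e 1 hse (by omega) hsame hleft


-- ---- cell-level candidacy vs run-level classification ----

-- each flag-loop conjunct of A equals the corresponding colour comparison of B
theorem iso_key (grid : List (List Int)) (rows cols : Nat) (v : Int) (hv : v ≠ 0) (nr nc : Int) :
    (!(decide (0 ≤ nr) && decide (nr < (rows : Int)) && decide (0 ≤ nc) &&
        decide (nc < (cols : Int)) && ((grid.getD nr.toNat []).getD nc.toNat 0 == v)))
      = (colorB grid rows cols nr nc != v) := by
  have hv' : (0 : Int) ≠ v := fun h => hv h.symm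
  by_cases h1 : 0 ≤ nr <;> by_cases h2 : nr < (rows : Int) <;>
    by_cases h3 : 0 ≤ nc <;> by_cases h4 : nc < (cols : Int) <;>
    simp [colorB, h1, h2, h3, h4, bne, hv']

-- for a nonzero cell, B's candidate predicate is exactly A's isolation flag loop
theorem cand_iso (grid : List (List Int)) (rows cols r s : Nat)
    (hv : (grid.getD r []).getD s 0 ≠ 0) :
    isCandB grid rows cols r s = isoA grid rows cols r s ((grid.getD r []).getD s 0) := by
  have hb : ((grid.getD r []).getD s 0 != 0) = true := by simpa using hv
  unfold isCandB isoA
  simp only [List.all_cons, List.all_nil, Bool.and_true, hb, Bool.true_and]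
  rw [iso_key grid rows cols _ hv, iso_key grid rows cols _ hv,
    iso_key grid rows cols _ hv, iso_key grid rows cols _ hv]
  ac_rfl

-- a cell of a run of length ≥ 2 has a same-colour horizontal neighbour, so is no candidate
theorem cand_in_run_false (grid : List (List Int)) (rows cols r s e k : Nat) (hr : r < rows)
    (hse : s ≤ k) (hke : k < e) (hec : e ≤ cols) (hlen : 2 ≤ e - s)
    (hv : (grid.getD r []).getD s 0 ≠ 0)
    (hsame : ∀ j, s ≤ j → j < e → (grid.getD r []).getD j 0 = (grid.getD r []).getD s 0) :
    isCandB grid rows cols r k = false := by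
  have hvk : (grid.getD r []).getD k 0 = (grid.getD r []).getD s 0 := hsame k hse hke
  have hcol : ∀ (j : Nat), j < cols →
      colorB grid rows cols ((r : Nat) : Int) ((j : Nat) : Int) = (grid.getD r []).getD j 0 := by
    intro j hj
    unfold colorB
    rw [if_pos ⟨by positivity, by exact_mod_cast hr, by positivity, by exact_mod_cast hj⟩]
    simp
  unfold isCandB
  simp only [List.all_cons, List.all_nil, Bool.and_true]
  by_cases hk1 : k + 1 < e
  · have hnb : colorB grid rows cols ((r : Int)) ((k : Int) + 1) = (grid.getD r []).getD k 0 := by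
      have h2 : ((k : Int) + 1) = (((k + 1 : Nat)) : Int) := by push_cast; ring
      rw [h2, hcol (k + 1) (by omega), hvk, hsame (k + 1) (by omega) hk1]
    simp only [Bool.and_eq_false_iff, bne_eq_false_iff_eq]
    right; right; right; left
    simpa [List.getD_eq_getElem?_getD] using hnb
  · have hks : s < k := by omega
    have hnb : colorB grid rows cols ((r : Int)) ((k : Int) + -1) = (grid.getD r []).getD k 0 := by
      have h2 : ((k : Int) + -1) = (((k - 1 : Nat)) : Int) := by omega
      rw [h2, hcol (k - 1) (by omega), hvk, hsame (k - 1) (by omega) (by omega)]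
    simp only [Bool.and_eq_false_iff, bne_eq_false_iff_eq]
    right; right; right; right
    simpa [List.getD_eq_getElem?_getD] using hnb

-- ---- the two row characterisations: B's right-to-left searches = last over A's runs ----

theorem rowCand (grid : List (List Int)) (rows cols r : Nat) (hr : r < rows) (c : Nat)
    (hc : c ≤ cols)
    (H : c < cols → (grid.getD r []).getD c 0 ≠ 0 →
      (c = 0 ∨ (grid.getD r []).getD (c - 1) 0 ≠ (grid.getD r []).getD c 0)) :
    ((List.range' c (cols - c)).reverse).find? (isCandB grid rows cols r)
      = (((runsFrom (grid.getD r []) cols c).map (toRun r (grid.getD r []))).reverse.find?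
          (candP grid rows cols)).map (fun b => b.2.1) := by
  rw [runsFrom]
  by_cases h : c < cols
  · rw [dif_pos h]
    by_cases hv : (grid.getD r []).getD c 0 ≠ 0
    · rw [if_pos hv]
      set row := grid.getD r [] with hrow
      set e := runEndA row cols (row.getD c 0) c with he
      have he1 : c < e := runEndA_gt row cols _ c h rfl
      have he2 : e ≤ cols := runEndA_le row cols _ c hc
      have hmem : ∀ k, c ≤ k → k < e → row.getD k 0 = row.getD c 0 :=
        fun k hk1 hk2 => runEndA_mem row cols _ c k hk1 hk2
      have Hnext : e < cols → row.getD e 0 ≠ 0 →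
          (e = 0 ∨ row.getD (e - 1) 0 ≠ row.getD e 0) := by
        intro hlt _
        right
        rw [hmem (e - 1) (by omega) (by omega)]
        exact fun hEq => runEndA_stop row cols (row.getD c 0) c hlt hEq.symm
      have hsplit : List.range' c (cols - c) = List.range' c (e - c) ++ List.range' e (cols - e) := by
        have h0 : List.range' c (e - c) ++ List.range' (c + (e - c)) (cols - e) =
            List.range' c ((e - c) + (cols - e)) := List.range'_append_1
        rw [show c + (e - c) = e by omega] at h0
        rw [h0]
        congr 1
        omega
      rw [hsplit, List.reverse_append, List.find?_append, List.map_cons, List.reverse_cons,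
        List.find?_append, rowCand grid rows cols r hr e he2 Hnext]
      cases hT : (((runsFrom row cols e).map (toRun r row)).reverse.find? (candP grid rows cols)) with
      | some b => simp
      | none =>
        simp only [Option.map_none, Option.none_or]
        have hhd : candP grid rows cols (toRun r row (c, e))
            = ((e - c == 1) && isoA grid rows cols r c (row.getD c 0)) := by
          simp [candP, toRun]
        by_cases hcand : ((e - c == 1) && isoA grid rows cols r c (row.getD c 0)) = true
        · have hec1 : e - c = 1 := by
            have h1 := (Bool.and_eq_true_iff.mp hcand).1
            rwa [Nat.beq_eq_true_eq] at h1
          have hiso : isoA grid rows cols r c (row.getD c 0) = true :=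
            (Bool.and_eq_true_iff.mp hcand).2
          have hcc : isCandB grid rows cols r c = true := by
            rw [cand_iso grid rows cols r c hv, hiso]
          have hpc : candP grid rows cols (toRun r row (c, e)) = true := by
            rw [hhd]
            exact hcand
          rw [hec1, List.range'_one, List.reverse_singleton]
          simp only [List.find?_cons, List.find?_nil, hcc, hpc, Option.map_some]
          simp [toRun]
        · have hnone : ((List.range' c (e - c)).reverse).find? (isCandB grid rows cols r) = none := by
            rw [List.find?_eq_none]
            intro k hk
            rw [List.mem_reverse, List.mem_range'_1] at hk
            by_cases hlen : e - c = 1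
            · have hkc : k = c := by omega
              subst hkc
              have hisoF : isoA grid rows cols r k (row.getD k 0) = false := by
                by_contra hcon
                rw [Bool.not_eq_false] at hcon
                exact hcand (by rw [hlen, hcon]; decide)
              rw [cand_iso grid rows cols r k hv, hisoF]
              simp
            · rw [cand_in_run_false grid rows cols r c e k hr (by omega) (by omega) he2
                (by omega) hv hmem]
              simp
          have hpc : candP grid rows cols (toRun r row (c, e)) = false := by
            rw [hhd]
            rwa [← Bool.not_eq_true]
          rw [hnone]
          simp only [List.find?_cons, List.find?_nil, hpc, Option.map_none]
    · rw [if_neg hv]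
      rw [Decidable.not_not] at hv
      have H' : c + 1 < cols → (grid.getD r []).getD (c + 1) 0 ≠ 0 →
          (c + 1 = 0 ∨ (grid.getD r []).getD (c + 1 - 1) 0 ≠ (grid.getD r []).getD (c + 1) 0) := by
        intro _ hnz
        right
        simp only [Nat.add_sub_cancel]
        rw [hv]
        exact fun hEq => hnz hEq.symm
      have hsplit : List.range' c (cols - c) = c :: List.range' (c + 1) (cols - (c + 1)) := by
        rw [show cols - c = (cols - (c + 1)) + 1 by omega, List.range'_succ]
      rw [hsplit, List.reverse_cons, List.find?_append, rowCand grid rows cols r hr (c + 1) h H']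
      have hc0 : isCandB grid rows cols r c = false := by
        unfold isCandB
        rw [hv]
        simp
      simp only [List.find?_cons, List.find?_nil, hc0, Option.or_none]
  · rw [dif_neg h]
    rw [show cols - c = 0 by omega]
    simp
termination_by cols - c
decreasing_by
  · have := runEndA_gt (grid.getD r []) cols ((grid.getD r []).getD c 0) c h rfl
    omega
  · omega

theorem rowBar (grid : List (List Int)) (rows cols r : Nat) (hr : r < rows) (c : Nat)
    (hc : c ≤ cols)
    (H : c < cols → (grid.getD r []).getD c 0 ≠ 0 →
      (c = 0 ∨ (grid.getD r []).getD (c - 1) 0 ≠ (grid.getD r []).getD c 0)) :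
    ((List.range' c (cols - c)).reverse).find?
        (fun k => (grid.getD r []).getD k 0 != 0 && !(isCandB grid rows cols r k))
      = (((runsFrom (grid.getD r []) cols c).map (toRun r (grid.getD r []))).reverse.find?
          (fun b => !(candP grid rows cols b))).map (fun b => b.2.1 + b.2.2.1 - 1) := by
  rw [runsFrom]
  by_cases h : c < cols
  · rw [dif_pos h]
    by_cases hv : (grid.getD r []).getD c 0 ≠ 0
    · rw [if_pos hv]
      set row := grid.getD r [] with hrow
      set e := runEndA row cols (row.getD c 0) c with he
      have he1 : c < e := runEndA_gt row cols _ c h rfl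
      have he2 : e ≤ cols := runEndA_le row cols _ c hc
      have hmem : ∀ k, c ≤ k → k < e → row.getD k 0 = row.getD c 0 :=
        fun k hk1 hk2 => runEndA_mem row cols _ c k hk1 hk2
      have Hnext : e < cols → row.getD e 0 ≠ 0 →
          (e = 0 ∨ row.getD (e - 1) 0 ≠ row.getD e 0) := by
        intro hlt _
        right
        rw [hmem (e - 1) (by omega) (by omega)]
        exact fun hEq => runEndA_stop row cols (row.getD c 0) c hlt hEq.symm
      have hsplit : List.range' c (cols - c) = List.range' c (e - c) ++ List.range' e (cols - e) := by
        have h0 : List.range' c (e - c) ++ List.range' (c + (e - c)) (cols - e) =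
            List.range' c ((e - c) + (cols - e)) := List.range'_append_1
        rw [show c + (e - c) = e by omega] at h0
        rw [h0]
        congr 1
        omega
      rw [hsplit, List.reverse_append, List.find?_append, List.map_cons, List.reverse_cons,
        List.find?_append, rowBar grid rows cols r hr e he2 Hnext]
      cases hT : (((runsFrom row cols e).map (toRun r row)).reverse.find?
          (fun b => !(candP grid rows cols b))) with
      | some b => simp
      | none =>
        simp only [Option.map_none, Option.none_or]
        have hhd : candP grid rows cols (toRun r row (c, e))
            = ((e - c == 1) && isoA grid rows cols r c (row.getD c 0)) := by
          simp [candP, toRun]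
        by_cases hcand : ((e - c == 1) && isoA grid rows cols r c (row.getD c 0)) = true
        · -- the head run is the sentinel candidate: no bar cell in its chunk
          have hec1 : e - c = 1 := by
            have h1 := (Bool.and_eq_true_iff.mp hcand).1
            rwa [Nat.beq_eq_true_eq] at h1
          have hiso : isoA grid rows cols r c (row.getD c 0) = true :=
            (Bool.and_eq_true_iff.mp hcand).2
          have hcc : isCandB grid rows cols r c = true := by
            rw [cand_iso grid rows cols r c hv, hiso]
          have hpredF : (row.getD c 0 != 0 && !(isCandB grid rows cols r c)) = false := by
            rw [hcc]
            simp
          have hpc : candP grid rows cols (toRun r row (c, e)) = true := by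
            rw [hhd]
            exact hcand
          rw [hec1, List.range'_one, List.reverse_singleton]
          simp only [List.find?_cons, List.find?_nil, hpredF, hpc, Bool.not_true, Option.map_none]
        · -- the head run is a bar: its last cell e-1 is the first hit of the descending scan
          have hchunk : List.range' c (e - c) = List.range' c (e - c - 1) ++ [e - 1] := by
            have h9 : c + 1 * (e - c - 1) = e - 1 := by omega
            rw [show e - c = (e - c - 1) + 1 by omega, List.range'_concat, h9,
              show e - c - 1 + 1 - 1 = e - c - 1 by omega]
          have hlast : (row.getD (e - 1) 0 != 0 &&
              !(isCandB grid rows cols r (e - 1))) = true := by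
            have hval : row.getD (e - 1) 0 = row.getD c 0 := hmem (e - 1) (by omega) (by omega)
            have hnz : (row.getD (e - 1) 0 != 0) = true := by
              rw [hval]
              simpa using hv
            have hnc : isCandB grid rows cols r (e - 1) = false := by
              by_cases hlen : e - c = 1
              · have : e - 1 = c := by omega
                rw [this]
                have hisoF : isoA grid rows cols r c (row.getD c 0) = false := by
                  by_contra hcon
                  rw [Bool.not_eq_false] at hcon
                  exact hcand (by rw [hlen, hcon]; decide)
                rw [cand_iso grid rows cols r c hv, hisoF]
              · exact cand_in_run_false grid rows cols r c e (e - 1) hr (by omega) (by omega)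
                  he2 (by omega) hv hmem
            rw [hnc]
            simpa using hnz
          have hpcf : candP grid rows cols (toRun r row (c, e)) = false := by
            rw [hhd]
            rwa [← Bool.not_eq_true]
          rw [hchunk, List.reverse_append, List.reverse_singleton, List.singleton_append]
          simp only [List.find?_cons, List.find?_nil, hlast, hpcf, Bool.not_false, Option.map_some]
          simp only [toRun]
          congr 2
          omega
    · rw [if_neg hv]
      rw [Decidable.not_not] at hv
      have H' : c + 1 < cols → (grid.getD r []).getD (c + 1) 0 ≠ 0 →
          (c + 1 = 0 ∨ (grid.getD r []).getD (c + 1 - 1) 0 ≠ (grid.getD r []).getD (c + 1) 0) := by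
        intro _ hnz
        right
        simp only [Nat.add_sub_cancel]
        rw [hv]
        exact fun hEq => hnz hEq.symm
      have hsplit : List.range' c (cols - c) = c :: List.range' (c + 1) (cols - (c + 1)) := by
        rw [show cols - c = (cols - (c + 1)) + 1 by omega, List.range'_succ]
      rw [hsplit, List.reverse_cons, List.find?_append, rowBar grid rows cols r hr (c + 1) h H']
      have hpz : ((grid.getD r []).getD c 0 != 0 && !(isCandB grid rows cols r c)) = false := by
        rw [hv]
        simp
      simp only [List.find?_cons, List.find?_nil, hpz, Option.or_none]
  · rw [dif_neg h]
    rw [show cols - c = 0 by omega]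
    simp
termination_by cols - c
decreasing_by
  · have := runEndA_gt (grid.getD r []) cols ((grid.getD r []).getD c 0) c h rfl
    omega
  · omega

-- ---- last written value per row (A's out loop overwrites left to right) ----

def lastV (bars : List (Nat × Nat × Nat × Int)) (r : Nat) : Option Int :=
  match bars with
  | [] => none
  | b :: bs =>
    match lastV bs r with
    | some v => some v
    | none => if b.1 = r then some (PySem.Int.mod (((b.2.2.1 : Int) - 1) ^ 2) 10) else none

theorem lastV_append (l1 l2 : List (Nat × Nat × Nat × Int)) (r : Nat) :
    lastV (l1 ++ l2) r = match lastV l2 r with | some v => some v | none => lastV l1 r := by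
  induction l1 with
  | nil => cases h : lastV l2 r <;> simp [lastV, h]
  | cons b l ih =>
    rw [List.cons_append, lastV, ih, lastV]
    cases lastV l2 r <;> cases lastV l r <;> simp

theorem lastV_none (l : List (Nat × Nat × Nat × Int)) (r : Nat) (h : ∀ b ∈ l, b.1 ≠ r) :
    lastV l r = none := by
  induction l with
  | nil => rfl
  | cons b bs ih =>
    rw [lastV, ih (fun x hx => h x (List.mem_cons_of_mem _ hx))]
    simp [h b (List.mem_cons_self ..)]

theorem lastV_all (l : List (Nat × Nat × Nat × Int)) (r : Nat) (h : ∀ b ∈ l, b.1 = r) :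
    lastV l r = (l.getLast?).map (fun b => PySem.Int.mod (((b.2.2.1 : Int) - 1) ^ 2) 10) := by
  induction l with
  | nil => rfl
  | cons b bs ih =>
    rw [lastV, ih (fun x hx => h x (List.mem_cons_of_mem _ hx))]
    cases hl : bs.getLast? with
    | some v => simp [List.getLast?_cons, hl, List.getLastD_eq_getLast?]
    | none => simp [List.getLast?_cons, hl, List.getLastD_eq_getLast?, h b (List.mem_cons_self ..)]

-- ---- output construction ----

theorem foldA_getElem? (sc : Nat) (bars : List (Nat × Nat × Nat × Int))
    (g : List (List Int)) (r : Nat) :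
    (bars.foldl (fun out b =>
        out.set b.1 ((out.getD b.1 []).set sc (PySem.Int.mod (((b.2.2.1 : Int) - 1) ^ 2) 10))) g)[r]?
      = g[r]?.map (fun row => match lastV bars r with
          | some v => row.set sc v
          | none => row) := by
  induction bars generalizing g with
  | nil =>
    rw [lastV]
    simp only [List.foldl_nil]
    cases g[r]? <;> rfl
  | cons b bs ih =>
    rw [List.foldl_cons, ih, lastV]
    by_cases h1 : b.1 = r
    · subst h1
      by_cases h2 : b.1 < g.length
      · have hgd : g.getD b.1 [] = g[b.1] := by
          rw [List.getD_eq_getElem?_getD, List.getElem?_eq_getElem h2]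
          rfl
        rw [List.getElem?_set_self (by simpa using h2), List.getElem?_eq_getElem h2, hgd]
        cases hl : lastV bs b.1 with
        | some v => simp [List.set_set]
        | none => simp
      · rw [List.set_eq_of_length_le (by omega), List.getElem?_eq_none (by omega)]
        cases hl : lastV bs b.1 <;> rfl
    · rw [List.getElem?_set_ne h1]
      cases hl : lastV bs r with
      | some v => rfl
      | none => simp [h1]

theorem enum_map_set (row : List Int) (sc : Nat) (v : Int) :
    ((PySem.List.enumerate row).map fun p => if p.1 == (sc : Int) then v else p.2)
      = row.set sc v := by
  apply List.ext_getElem?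
  intro k
  rw [List.getElem?_map, PySem.List.getElem?_enumerate, List.getElem?_set]
  rcases hk : row[k]? with _ | x
  · have hlen : ¬ k < row.length := by
      intro hlt
      rw [List.getElem?_eq_getElem hlt] at hk
      cases hk
    by_cases h : sc = k <;> simp [h, hlen]
  · have hlt : k < row.length := by
      by_contra hh
      rw [List.getElem?_eq_none (by omega)] at hk
      cases hk
    by_cases h : sc = k
    · subst h
      simp [hlt]
    · simp [Ne.symm h]
      exact fun hh => absurd hh h

theorem lastV_flatMap (F : Nat → List (Nat × Nat × Nat × Int)) (rs : List Nat)
    (hF : ∀ r' ∈ rs, ∀ b ∈ F r', b.1 = r') (r : Nat) :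
    lastV (rs.flatMap F) r
      = if r ∈ rs
        then (F r).getLast?.map (fun b => PySem.Int.mod (((b.2.2.1 : Int) - 1) ^ 2) 10)
        else none := by
  induction rs using List.reverseRecOn with
  | nil => simp [lastV]
  | append_singleton rs a ih =>
    have hFa : ∀ b ∈ F a, b.1 = a := hF a (by simp)
    have hrs : ∀ r' ∈ rs, ∀ b ∈ F r', b.1 = r' := fun r' h' => hF r' (by simp [h'])
    rw [List.flatMap_append, lastV_append]
    by_cases har : a = r
    · subst har
      have hfa : lastV (List.flatMap F [a]) a
          = (F a).getLast?.map (fun b => PySem.Int.mod (((b.2.2.1 : Int) - 1) ^ 2) 10) := by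
        rw [show List.flatMap F [a] = F a by simp]
        exact lastV_all (F a) a hFa
      rw [hfa]
      cases hl : (F a).getLast?.map (fun b => PySem.Int.mod (((b.2.2.1 : Int) - 1) ^ 2) 10) with
      | some v => simp [hl]
      | none =>
        rw [ih hrs, if_pos (show a ∈ rs ++ [a] by simp), hl]
        by_cases hmem : a ∈ rs <;> simp [hmem]
    · have hfa : lastV (List.flatMap F [a]) r = none := by
        rw [show List.flatMap F [a] = F a by simp]
        exact lastV_none (F a) r (fun b hb => by rw [hFa b hb]; exact har)
      rw [hfa, ih hrs]
      by_cases hmem : r ∈ rs <;> simp [hmem, har, Ne.symm har]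

theorem out_eq (grid : List (List Int)) (sc : Nat) (bars : List (Nat × Nat × Nat × Int))
    (vals : List (Option Int)) (hv : ∀ r, r < grid.length → vals.getD r none = lastV bars r) :
    bars.foldl (fun out b =>
        out.set b.1 ((out.getD b.1 []).set sc (PySem.Int.mod (((b.2.2.1 : Int) - 1) ^ 2) 10))) grid
      = (PySem.List.enumerate grid).map fun q =>
          (PySem.List.enumerate q.2).map fun p =>
            if p.1 == (sc : Int) && (vals.getD q.1.toNat none).isSome then
              (vals.getD q.1.toNat none).getD 0
            else p.2 := by
  apply List.ext_getElem?
  intro r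
  rw [foldA_getElem?, List.getElem?_map, PySem.List.getElem?_enumerate]
  rcases hg : grid[r]? with _ | row
  · rfl
  · have hrlen : r < grid.length := by
      by_contra hh
      rw [List.getElem?_eq_none (by omega)] at hg
      cases hg
    simp only [Option.map_some]
    have hgd : vals.getD (((0 : Int) + (r : Nat)).toNat) none = lastV bars r := by
      rw [show ((0 : Int) + (r : Nat)).toNat = r by omega]
      exact hv r hrlen
    congr 1
    cases h : lastV bars r with
    | some v =>
      have hfn : (fun (p : Int × Int) =>
          if p.1 == (sc : Int) && (vals.getD (((0 : Int) + (r : Nat)).toNat) none).isSome then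
            (vals.getD (((0 : Int) + (r : Nat)).toNat) none).getD 0
          else p.2) = (fun p => if p.1 == (sc : Int) then v else p.2) := by
        funext p
        rw [hgd, h]
        simp
      rw [hfn, enum_map_set]
    | none =>
      have hfn : (fun (p : Int × Int) =>
          if p.1 == (sc : Int) && (vals.getD (((0 : Int) + (r : Nat)).toNat) none).isSome then
            (vals.getD (((0 : Int) + (r : Nat)).toNat) none).getD 0
          else p.2) = (fun (p : Int × Int) => p.2) := by
        funext p
        rw [hgd, h]
        simp
      rw [hfn, PySem.List.map_snd_enumerate]

def barsRow (grid : List (List Int)) (rows cols r : Nat) : List (Nat × Nat × Nat × Int) :=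
  (Rrow grid rows cols r).filter (fun b => !(candP grid rows cols b))

def GRow (grid : List (List Int)) (rows cols r : Nat) : Option (Nat × Nat) :=
  (Rrow grid rows cols r).reverse.findSome?
    (fun b => if candP grid rows cols b then some (b.1, b.2.1) else none)

theorem Rrow_fst (grid : List (List Int)) (rows cols r : Nat) :
    ∀ b ∈ Rrow grid rows cols r, b.1 = r := by
  intro b hb
  rcases List.mem_map.mp hb with ⟨p, _, rfl⟩
  rfl

theorem pv_foldl_append (T U : Type) (l : List T) (f : T → List U) (acc : List U) :
    l.foldl (fun a x => a ++ f x) acc = acc ++ l.flatMap f := by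
  induction l generalizing acc with
  | nil => simp
  | cons x l ih => simp [List.foldl_cons, ih]

theorem res_eq (grid : List (List Int)) (rows cols : Nat) :
    (List.range rows).foldl (fun st r => loopA grid rows cols r 0 st.1 st.2) ([], none)
      = ((List.range rows).flatMap (barsRow grid rows cols),
         (List.range rows).reverse.findSome? (GRow grid rows cols)) := by
  have hfun : (fun (st : List (Nat × Nat × Nat × Int) × Option (Nat × Nat)) (r : Nat) =>
      loopA grid rows cols r 0 st.1 st.2)
      = fun st r => (st.1 ++ barsRow grid rows cols r,
          (Rrow grid rows cols r).foldl
            (fun s b => if candP grid rows cols b then some (b.1, b.2.1) else s) st.2) := by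
    funext st r
    rw [loopA_runs, fold_split]
    rfl
  rw [hfun, pv_foldl_split _ _ _ _
    (fun acc r => acc ++ barsRow grid rows cols r)
    (fun s r => (Rrow grid rows cols r).foldl
      (fun s b => if candP grid rows cols b then some (b.1, b.2.1) else s) s)
    (fun _ _ => rfl) (List.range rows) [] none]
  congr 1
  · rw [pv_foldl_append]
    simp
  · have key : ∀ (l : List (Nat × Nat × Nat × Int)) (s : Option (Nat × Nat)),
        l.foldl (fun s b => if candP grid rows cols b then some (b.1, b.2.1) else s) s
          = match l.reverse.findSome?
              (fun b => if candP grid rows cols b then some (b.1, b.2.1) else none) with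
            | some y => some y
            | none => s := by
      intro l
      induction l with
      | nil =>
        intro s
        rfl
      | cons b l ih =>
        intro s
        rw [List.foldl_cons, List.reverse_cons, List.findSome?_append, ih]
        by_cases hb : candP grid rows cols b = true <;>
          cases hl : l.reverse.findSome?
            (fun b => if candP grid rows cols b then some (b.1, b.2.1) else none) <;>
          simp [List.findSome?, hb, hl]
    have key2 : ∀ (ls : List Nat) (s : Option (Nat × Nat)),
        ls.foldl (fun s r => (Rrow grid rows cols r).foldl
          (fun s b => if candP grid rows cols b then some (b.1, b.2.1) else s) s) s
          = match ls.reverse.findSome? (fun r => (Rrow grid rows cols r).reverse.findSome?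
              (fun b => if candP grid rows cols b then some (b.1, b.2.1) else none)) with
            | some y => some y
            | none => s := by
      intro ls
      induction ls with
      | nil =>
        intro s
        rfl
      | cons a ls ih =>
        intro s
        rw [List.foldl_cons, List.reverse_cons, List.findSome?_append, ih, key]
        cases hg : (Rrow grid rows cols a).reverse.findSome?
            (fun b => if candP grid rows cols b then some (b.1, b.2.1) else none) <;>
          cases hl : ls.reverse.findSome? (fun r => (Rrow grid rows cols r).reverse.findSome?
              (fun b => if candP grid rows cols b then some (b.1, b.2.1) else none)) <;>
          simp [List.findSome?, hg, hl]
    rw [key2]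
    have hfold : (List.range rows).reverse.findSome?
        (fun r => (Rrow grid rows cols r).reverse.findSome?
          (fun b => if candP grid rows cols b then some (b.1, b.2.1) else none))
        = (List.range rows).reverse.findSome? (GRow grid rows cols) := rfl
    rw [hfold]
    cases (List.range rows).reverse.findSome? (GRow grid rows cols) <;> rfl

theorem GRow_eq (grid : List (List Int)) (cols r : Nat) (hrr : r < grid.length) :
    GRow grid grid.length cols r
      = (lastCandB grid grid.length cols r).map (fun cc => (r, cc)) := by
  unfold GRow lastCandB descB
  have h0 := rowCand grid grid.length cols r hrr 0 (Nat.zero_le _) (fun _ _ => Or.inl rfl)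
  rw [Nat.sub_zero, ← List.range_eq_range'] at h0
  rw [h0, pv_findSome?_if, Option.map_map]
  unfold Rrow
  cases hf : ((runsFrom (grid.getD r []) cols 0).map (toRun r (grid.getD r []))).reverse.find?
      (candP grid grid.length cols) with
  | none => rfl
  | some b =>
    have hb1 : b.1 = r := by
      have hmemb : b ∈ ((runsFrom (grid.getD r []) cols 0).map (toRun r (grid.getD r []))).reverse :=
        List.mem_of_find?_eq_some hf
      rw [List.mem_reverse] at hmemb
      exact Rrow_fst grid grid.length cols r b hmemb
    simp [Function.comp_def, hb1]

theorem rowVal_eq (grid : List (List Int)) (cols r : Nat) (hrr : r < grid.length) :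
    rowValB grid grid.length cols r
      = ((Rrow grid grid.length cols r).reverse.find?
          (fun b => !(candP grid grid.length cols b))).map
          (fun b => PySem.Int.mod (((b.2.2.1 : Int) - 1) ^ 2) 10) := by
  unfold rowValB lastBarCellB descB
  have h0 := rowBar grid grid.length cols r hrr 0 (Nat.zero_le _) (fun _ _ => Or.inl rfl)
  rw [Nat.sub_zero, ← List.range_eq_range'] at h0
  rw [h0, Option.map_map]
  unfold Rrow
  cases hf : ((runsFrom (grid.getD r []) cols 0).map (toRun r (grid.getD r []))).reverse.find?
      (fun b => !(candP grid grid.length cols b)) with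
  | none => rfl
  | some b =>
    have hmemb : b ∈ (runsFrom (grid.getD r []) cols 0).map (toRun r (grid.getD r [])) := by
      have := List.mem_of_find?_eq_some hf
      rwa [List.mem_reverse] at this
    rcases List.mem_map.mp hmemb with ⟨p, hp, rfl⟩
    have hfacts := runsFrom_mem (grid.getD r []) cols 0 (Nat.zero_le _)
      (fun _ _ => Or.inl rfl) p hp
    obtain ⟨-, h12, -, -, hsame, hbd, -⟩ := hfacts
    have hidx : (toRun r (grid.getD r []) p).2.1 + (toRun r (grid.getD r []) p).2.2.1 - 1
        = p.2 - 1 := by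
      simp only [toRun]
      omega
    have hext : extLenB (grid.getD r []) (p.2 - 1) 1 = p.2 - p.1 :=
      extLen_run (grid.getD r []) p.1 p.2 h12 hsame hbd
    simp only [Option.map_some, Function.comp_def, toRun]
    rw [show p.1 + (p.2 - p.1) - 1 = p.2 - 1 by omega, hext]

theorem lastV_rows (grid : List (List Int)) (cols r : Nat) (hrr : r < grid.length) :
    lastV ((List.range grid.length).flatMap (barsRow grid grid.length cols)) r
      = ((Rrow grid grid.length cols r).reverse.find?
          (fun b => !(candP grid grid.length cols b))).map
          (fun b => PySem.Int.mod (((b.2.2.1 : Int) - 1) ^ 2) 10) := by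
  rw [lastV_flatMap (barsRow grid grid.length cols) (List.range grid.length)
      (fun r' _ b hb => Rrow_fst grid grid.length cols r' b (List.mem_of_mem_filter hb)) r,
    if_pos (List.mem_range.mpr hrr)]
  unfold barsRow
  rw [pv_getLast?_filter]

theorem pv_main (grid : List (List Int)) (hpre : Pre_solve_e48_e048c9ed grid) :
    solve_e48_e048c9ed grid = solve_e48_e048c9ed_alt grid := by
  simp only [solve_e48_e048c9ed, solve_e48_e048c9ed_alt]
  rw [res_eq grid grid.length (grid.headD []).length]
  have hsentsnd : (((List.range grid.length).reverse.findSome?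
        (GRow grid grid.length (grid.headD []).length))).map Prod.snd
      = (((List.range grid.length).map
          (lastCandB grid grid.length (grid.headD []).length)).reverse).findSome? id := by
    rw [← List.map_reverse, List.findSome?_map,
      pv_findSome?_congr _ _ _ _ (fun r => (lastCandB grid grid.length (grid.headD []).length r).map
        (fun cc => (r, cc)))
        (fun r hr => GRow_eq grid (grid.headD []).length r
          (by rw [List.mem_reverse, List.mem_range] at hr; exact hr))]
    exact pv_findSome?_snd _ _ (lastCandB grid grid.length (grid.headD []).length) (fun r => r)
  have hvv : ∀ r, r < grid.length →
      ((List.range grid.length).map (rowValB grid grid.length (grid.headD []).length)).getD r none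
        = lastV ((List.range grid.length).flatMap
            (barsRow grid grid.length (grid.headD []).length)) r := by
    intro r hrr
    rw [List.getD_eq_getElem?_getD, List.getElem?_map, List.getElem?_range hrr]
    rw [lastV_rows grid (grid.headD []).length r hrr, ← rowVal_eq grid (grid.headD []).length r hrr]
    rfl
  cases hsent : (List.range grid.length).reverse.findSome?
      (GRow grid grid.length (grid.headD []).length) with
  | none =>
    have hcall : ((List.range grid.length).map
        (lastCandB grid grid.length (grid.headD []).length)).all (·.isNone) = true := by
      rw [List.all_map, List.all_eq_true]
      intro r hrm
      have hnone : GRow grid grid.length (grid.headD []).length r = none :=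
        List.findSome?_eq_none_iff.mp hsent r (by rw [List.mem_reverse]; exact hrm)
      rw [GRow_eq grid (grid.headD []).length r (List.mem_range.mp hrm)] at hnone
      rw [Option.map_eq_none_iff] at hnone
      show (lastCandB grid grid.length (grid.headD []).length r).isNone = true
      rw [hnone]
      rfl
    rw [if_pos (show (((List.range grid.length).map
        (lastCandB grid grid.length (grid.headD []).length)).all (·.isNone)
        || ((List.range grid.length).map
          (rowValB grid grid.length (grid.headD []).length)).all (·.isNone)) = true by
      rw [hcall]
      exact Bool.true_or _)]
  | some q =>
    obtain ⟨sr, sc⟩ := q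
    dsimp only
    have hid : (((List.range grid.length).map
        (lastCandB grid grid.length (grid.headD []).length)).reverse).findSome? id = some sc := by
      rw [← hsentsnd, hsent]
      rfl
    have hcall : ((List.range grid.length).map
        (lastCandB grid grid.length (grid.headD []).length)).all (·.isNone) = false := by
      by_contra hcon
      rw [Bool.not_eq_false] at hcon
      have h := hcon
      · exfalso
        rw [List.all_eq_true] at h
        have : (((List.range grid.length).map
            (lastCandB grid grid.length (grid.headD []).length)).reverse).findSome? id = none := by
          rw [List.findSome?_eq_none_iff]
          intro x hx
          have := h x (by rwa [List.mem_reverse] at hx)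
          simpa [Option.isNone_iff_eq_none] using this
        rw [this] at hid
        cases hid
    by_cases hbe : ((List.range grid.length).flatMap
        (barsRow grid grid.length (grid.headD []).length)).isEmpty = true
    · have hnil : ∀ r ∈ List.range grid.length,
          barsRow grid grid.length (grid.headD []).length r = [] := by
        rw [← List.flatMap_eq_nil_iff]
        exact List.isEmpty_iff.mp hbe
      have hvall : ((List.range grid.length).map
          (rowValB grid grid.length (grid.headD []).length)).all (·.isNone) = true := by
        rw [List.all_map, List.all_eq_true]
        intro r hrm
        have hfnone : (Rrow grid grid.length (grid.headD []).length r).reverse.find?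
            (fun b => !(candP grid grid.length (grid.headD []).length b)) = none := by
          rw [← pv_getLast?_filter]
          have := hnil r hrm
          unfold barsRow at this
          rw [this]
          rfl
        have hre := rowVal_eq grid (grid.headD []).length r (List.mem_range.mp hrm)
        rw [hfnone] at hre
        show (rowValB grid grid.length (grid.headD []).length r).isNone = true
        rw [hre]
        rfl
      rw [if_pos hbe]
      rw [if_pos (show _ = true by
        rw [hvall]
        exact Bool.or_true _)]
    · have hvalf : ((List.range grid.length).map
          (rowValB grid grid.length (grid.headD []).length)).all (·.isNone) = false := by
        have hex : ∃ r ∈ List.range grid.length,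
            barsRow grid grid.length (grid.headD []).length r ≠ [] := by
          by_contra hno
          push_neg at hno
          exact hbe (List.isEmpty_iff.mpr (List.flatMap_eq_nil_iff.mpr hno))
        obtain ⟨r, hrm, hne⟩ := hex
        by_contra hcon
        rw [Bool.not_eq_false] at hcon
        have h := hcon
        · exfalso
          rw [List.all_map, List.all_eq_true] at h
          have h2 : (rowValB grid grid.length (grid.headD []).length r).isNone = true := h r hrm
          have h3 : rowValB grid grid.length (grid.headD []).length r = none :=
            Option.isNone_iff_eq_none.mp h2
          rw [rowVal_eq grid (grid.headD []).length r (List.mem_range.mp hrm),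
            Option.map_eq_none_iff] at h3
          have h4 : (barsRow grid grid.length (grid.headD []).length r).getLast? = none := by
            unfold barsRow
            rw [pv_getLast?_filter]
            exact h3
          exact hne (List.getLast?_eq_none_iff.mp h4)
      rw [if_neg hbe]
      rw [if_neg (show ¬ _ = true by
        rw [hcall, hvalf]
        simp)]
      rw [hid]
      simp only [Option.getD_some]
      exact out_eq grid sc _ _ hvv

-- ===== VERDICT (by name: the statement is the Claim_ definition above) =====
theorem solve_e48_e048c9ed_spec : Claim_equal_solve_e48_e048c9ed := by
  intro grid _ hpre
  unfold Spec_solve_e48_e048c9ed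
  exact pv_main grid hpre
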